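-- pv_equiv track=rewrite | github.com/c8ler/py-dz-5 | dz5/task_2.py | FindLst
-- ===== SOURCE A (Python) =====
-- def FindLst(lst):
--     min = lst[0]
--     max = lst[0]
--     for i in range(1, len(lst)):
--         for j in range(1, len(lst)):
--             if lst[j] < min:
--                 min = lst[j]
--             elif lst[j] == max + 1:
--                 max = lst[j]
--     lst2 = [min, max]
--     return lst2
-- ===== SOURCE B (Python) =====
-- def FindLst(lst):
--     start = lst[0]
--     mn = min(lst)
--     s = sorted(set(lst))
--     mx = start
--     for v in s[s.index(start) + 1:]:
--         if v == mx + 1: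
--             mx = v
--         else:
--             break
--     return [mn, mx]
-- ===== Notes on version B (the rewrite author's own statement) =====
-- stated objective: faster
-- what changed: Replaces A's quadratic nested rescans with one min pass plus a sorted-distinct-values index walked linearly from the first element to the end of its consecutive run.
import Mathlib
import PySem

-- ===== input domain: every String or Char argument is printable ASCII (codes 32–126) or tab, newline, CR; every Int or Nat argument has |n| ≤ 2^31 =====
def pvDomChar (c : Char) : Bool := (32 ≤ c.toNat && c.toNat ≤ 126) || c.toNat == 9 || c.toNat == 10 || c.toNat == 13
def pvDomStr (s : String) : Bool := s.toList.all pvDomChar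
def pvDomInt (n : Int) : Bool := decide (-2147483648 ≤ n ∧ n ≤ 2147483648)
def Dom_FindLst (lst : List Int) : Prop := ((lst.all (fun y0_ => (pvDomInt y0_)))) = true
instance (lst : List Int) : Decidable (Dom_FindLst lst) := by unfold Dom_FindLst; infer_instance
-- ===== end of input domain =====

-- B replaces A's quadratic nested rescans with one min pass plus a linear walk along the
-- sorted distinct values from lst[0] (objective: faster).

-- ===== PORT A =====
-- body of A's inner loop: if lst[j] < min: min = lst[j]  elif lst[j] == max + 1: max = lst[j]
def stepA (st : Int × Int) (x : Int) : Int × Int :=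
  if x < st.1 then (x, st.2) else if x = st.2 + 1 then (st.1, x) else st

def FindLst (lst : List Int) : List Int :=
  match lst with
  | [] => []        -- Python raises IndexError on lst[0]; excluded by Pre_FindLst
  | m0 :: _ =>
    let n : Int := lst.length
    let p := (PySem.List.pyRange 1 n 1).foldl (fun st _i =>
      (PySem.List.pyRange 1 n 1).foldl
        (fun st j => stepA st (PySem.List.pyGetD lst j 0)) st) (m0, m0)
    [p.1, p.2]

-- ===== PORT B =====
-- the for-with-break over the suffix of sorted(set(lst)) after start
def walkB : List Int → Int → Int
  | [], mx => mx
  | v :: r, mx => if v = mx + 1 then walkB r v else mx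

def FindLst_alt (lst : List Int) : List Int :=
  match lst with
  | [] => []        -- Python raises IndexError on lst[0]; excluded by Pre_FindLst
  | start :: _ =>
    let mn := (PySem.List.min? lst (fun x => x)).getD start
    let s := PySem.List.sorted (PySem.Set.ofList lst) (fun x => x) false
    let i := (PySem.List.index? s start).getD 0
    [mn, walkB (s.drop (i + 1)) start]

-- ===== PRECONDITION & SPEC =====
-- Python A raises IndexError on the empty list (lst[0]); B raises there too.
def Pre_FindLst (lst : List Int) : Prop := lst ≠ []
instance (lst : List Int) : Decidable (Pre_FindLst lst) := by unfold Pre_FindLst; infer_instance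
def pvWitness_FindLst : List Int := [3, 5, 4]

def Spec_FindLst (lst : List Int) (out : List Int) : Prop := out = FindLst_alt lst
instance (lst : List Int) (out : List Int) : Decidable (Spec_FindLst lst out) := by unfold Spec_FindLst; infer_instance

-- ===== CLAIM (what is proved, stated in full; the proofs are below) =====
def Claim_equal_FindLst : Prop := ∀ (lst : List Int), Dom_FindLst lst → Pre_FindLst lst → Spec_FindLst lst (FindLst lst)

-- ===== LEMMAS AND PROOFS =====

-- the max-update half of A's inner body, in isolation
def gstep (m x : Int) : Int := if x = m + 1 then x else m

theorem foldl_const_eq_iterate {α β : Type} (l : List β) (f : α → α) (s : α) :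
    l.foldl (fun s _ => f s) s = f^[l.length] s := by
  induction l generalizing s with
  | nil => rfl
  | cons x r ih => simp [List.foldl_cons, ih, Function.iterate_succ_apply]

theorem foldl_min_le_init (l : List Int) (m : Int) : l.foldl min m ≤ m := by
  induction l generalizing m with
  | nil => simp
  | cons x r ih => exact le_trans (ih _) (min_le_left _ _)

theorem foldl_min_le_mem (l : List Int) (m : Int) : ∀ x ∈ l, l.foldl min m ≤ x := by
  induction l generalizing m with
  | nil => simp
  | cons y r ih =>
    intro x hx
    rcases List.mem_cons.mp hx with h | h
    · subst h; exact le_trans (foldl_min_le_init r _) (min_le_right _ _)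
    · exact ih _ x h

theorem foldl_min_fix (l : List Int) (m : Int) (h : ∀ x ∈ l, m ≤ x) : l.foldl min m = m := by
  induction l with
  | nil => rfl
  | cons x r ih =>
    have hx : m ≤ x := h x (List.mem_cons_self ..)
    simp only [List.foldl_cons, min_eq_left hx]
    exact ih (fun y hy => h y (List.mem_cons_of_mem _ hy))

theorem foldl_gstep_ge (l : List Int) (m : Int) : m ≤ l.foldl gstep m := by
  induction l generalizing m with
  | nil => simp
  | cons x r ih =>
    refine le_trans ?_ (ih (gstep m x))
    unfold gstep; split <;> omega

theorem foldl_gstep_le (W : Int) : ∀ (l : List Int) (m : Int), m ≤ W →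
    (∀ x ∈ l, x ≠ W + 1) → l.foldl gstep m ≤ W := by
  intro l
  induction l with
  | nil => intro m hm _; simpa
  | cons x r ih =>
    intro m hm hW
    have hx := hW x (List.mem_cons_self ..)
    have hs : gstep m x ≤ W := by unfold gstep; split <;> omega
    exact ih _ hs (fun y hy => hW y (List.mem_cons_of_mem _ hy))

theorem foldl_gstep_prog (l : List Int) (m : Int) (h : m + 1 ∈ l) :
    m + 1 ≤ l.foldl gstep m := by
  induction l generalizing m with
  | nil => simp at h
  | cons x r ih =>
    by_cases hx : x = m + 1
    · subst hx
      simp only [List.foldl_cons, gstep]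
      exact foldl_gstep_ge r (m + 1)
    · have : m + 1 ∈ r := by
        rcases List.mem_cons.mp h with h' | h'
        · exact absurd h'.symm hx
        · exact h'
      simpa only [List.foldl_cons, gstep, if_neg hx] using ih m this

-- decoupling A's inner pass into the two independent folds
theorem foldl_stepA_decouple (l : List Int) (mn mx : Int) (h : mn ≤ mx) :
    l.foldl stepA (mn, mx) = (l.foldl min mn, l.foldl gstep mx) := by
  induction l generalizing mn mx with
  | nil => rfl
  | cons x r ih =>
    simp only [List.foldl_cons]
    by_cases h1 : x < mn
    · have hne : x ≠ mx + 1 := by omega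
      have e1 : stepA (mn, mx) x = (x, mx) := by simp [stepA, h1]
      have e2 : min mn x = x := by omega
      have e3 : gstep mx x = mx := by simp [gstep, hne]
      rw [e1, e2, e3, ih x mx (by omega)]
    · by_cases h2 : x = mx + 1
      · have e1 : stepA (mn, mx) x = (mn, x) := by simp only [stepA, if_neg h1, if_pos h2]
        have e2 : min mn x = mn := by omega
        have e3 : gstep mx x = x := by simp [gstep, h2]
        rw [e1, e2, e3, ih mn x (by omega)]
      · have e1 : stepA (mn, mx) x = (mn, mx) := by simp only [stepA, if_neg h1, if_neg h2]
        have e2 : min mn x = mn := by omega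
        have e3 : gstep mx x = mx := by simp [gstep, h2]
        rw [e1, e2, e3, ih mn mx h]

-- iterating the pass: the min component stabilizes after one pass, the max component iterates gstep
theorem pass_iterate (t : List Int) (a : Int) (k : Nat) :
    (fun st => t.foldl stepA st)^[k + 1] (a, a) =
      (t.foldl min a, (fun m => t.foldl gstep m)^[k + 1] a) := by
  induction k with
  | zero =>
    simpa only [zero_add, Function.iterate_one] using foldl_stepA_decouple t a a le_rfl
  | succ k ih =>
    rw [Function.iterate_succ_apply' (n := k + 1), ih,
        Function.iterate_succ_apply' (n := k + 1) (f := fun m => t.foldl gstep m)]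
    have hmono : a ≤ (fun m => t.foldl gstep m)^[k + 1] a := by
      clear ih
      induction (k + 1) with
      | zero => simp
      | succ j ihj =>
        rw [Function.iterate_succ_apply']
        exact le_trans ihj (foldl_gstep_ge t _)
    have h1 : t.foldl min a ≤ a := foldl_min_le_init t a
    rw [foldl_stepA_decouple t _ _ (le_trans h1 hmono)]
    rw [foldl_min_fix t _ (foldl_min_le_mem t a)]

-- B's walk computes the unique end of the consecutive run: chain below, blocked above
theorem walk_spec (lst : List Int) : ∀ (r : List Int) (cur : Int),
    r.Pairwise (· < ·) → (∀ x, x ∈ r ↔ x ∈ lst ∧ cur < x) →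
    cur ≤ walkB r cur ∧ (∀ k, cur < k → k ≤ walkB r cur → k ∈ lst) ∧ walkB r cur + 1 ∉ lst := by
  intro r
  induction r with
  | nil =>
    intro cur _ hmem
    have hw : walkB ([] : List Int) cur = cur := rfl
    rw [hw]
    refine ⟨le_rfl, by intro k h1 h2; omega, fun hc => ?_⟩
    exact absurd ((hmem _).mpr ⟨hc, by omega⟩) (List.not_mem_nil)
  | cons v r' ih =>
    intro cur hpw hmem
    have hv : v ∈ lst ∧ cur < v := (hmem v).mp (List.mem_cons_self ..)
    have hpw' : r'.Pairwise (· < ·) := (List.pairwise_cons.mp hpw).2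
    have hvlt : ∀ x ∈ r', v < x := (List.pairwise_cons.mp hpw).1
    by_cases hc : v = cur + 1
    · have hmem' : ∀ x, x ∈ r' ↔ x ∈ lst ∧ v < x := by
        intro x
        constructor
        · intro hx
          exact ⟨((hmem x).mp (List.mem_cons_of_mem _ hx)).1, hvlt x hx⟩
        · rintro ⟨hx1, hx2⟩
          have : x ∈ v :: r' := (hmem x).mpr ⟨hx1, by omega⟩
          rcases List.mem_cons.mp this with h | h
          · omega
          · exact h
      obtain ⟨ih1, ih2, ih3⟩ := ih v hpw' hmem'
      have hw : walkB (v :: r') cur = walkB r' v := by simp [walkB, hc]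
      rw [hw]
      refine ⟨by omega, ?_, ih3⟩
      intro k h1 h2
      by_cases hk : k = v
      · subst hk; exact hv.1
      · exact ih2 k (by omega) h2
    · have hw : walkB (v :: r') cur = cur := by simp [walkB, hc]
      rw [hw]
      refine ⟨le_rfl, by intro k h1 h2; omega, fun hc1 => ?_⟩
      have : cur + 1 ∈ v :: r' := (hmem _).mpr ⟨hc1, by omega⟩
      rcases List.mem_cons.mp this with h | h
      · omega
      · have := hvlt _ h; omega

-- the consecutive run above a has at most as many values as t holds
theorem chain_le_card (t : List Int) (a W : Int) (_haW : a ≤ W)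
    (hchain : ∀ k, a < k → k ≤ W → k ∈ t) : W ≤ a + t.length := by
  by_contra h
  push Not at h
  have hsub : Finset.Icc (a + 1) W ⊆ t.toFinset := by
    intro k hk
    rw [Finset.mem_Icc] at hk
    exact List.mem_toFinset.mpr (hchain k (by omega) hk.2)
  have h1 : (Finset.Icc (a + 1) W).card ≤ t.toFinset.card := Finset.card_le_card hsub
  have h2 : t.toFinset.card ≤ t.length := t.toFinset_card_le
  rw [Int.card_Icc] at h1
  omega

-- a ≤ g^[k] a  (needed inside iterate_gstep_ge)
theorem iterate_gstep_ge_aux (t : List Int) (a : Int) (k : Nat) :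
    a ≤ (fun m => t.foldl gstep m)^[k] a := by
  induction k with
  | zero => simp
  | succ k ih =>
    rw [Function.iterate_succ_apply']
    exact le_trans ih (foldl_gstep_ge t _)

theorem iterate_gstep_le (t : List Int) (a W : Int) (haW : a ≤ W)
    (hblock : ∀ x ∈ t, x ≠ W + 1) (k : Nat) :
    (fun m => t.foldl gstep m)^[k] a ≤ W := by
  induction k with
  | zero => simpa
  | succ k ih =>
    rw [Function.iterate_succ_apply']
    exact foldl_gstep_le W t _ ih hblock

theorem iterate_gstep_ge (t : List Int) (a W : Int) (_haW : a ≤ W)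
    (hchain : ∀ k, a < k → k ≤ W → k ∈ t) (k : Nat) :
    W ≤ (fun m => t.foldl gstep m)^[k] a ∨ a + k ≤ (fun m => t.foldl gstep m)^[k] a := by
  induction k with
  | zero => right; simp
  | succ k ih =>
    have hmono : (fun m => t.foldl gstep m)^[k] a ≤ (fun m => t.foldl gstep m)^[k + 1] a := by
      rw [Function.iterate_succ_apply']
      exact foldl_gstep_ge t _
    rcases ih with h | h
    · left; omega
    · by_cases hW : W ≤ (fun m => t.foldl gstep m)^[k] a
      · left; omega
      · right
        push Not at hW
        set m := (fun m => t.foldl gstep m)^[k] a with hm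
        have hmem : m + 1 ∈ t := hchain (m + 1) (by have := iterate_gstep_ge_aux t a k; omega) (by omega)
        have : m + 1 ≤ t.foldl gstep m := foldl_gstep_prog t m hmem
        rw [Function.iterate_succ_apply', ← hm]
        omega


-- membership in the suffix of sorted(set(lst)) after the index of a
theorem mem_drop_sorted_iff (lst : List Int) (a : Int) (s : List Int)
    (hs : s = PySem.List.sorted (PySem.Set.ofList lst) (fun x => x) false)
    (i : Nat) (hi : PySem.List.index? s a = some i) :
    ∀ x, x ∈ s.drop (i + 1) ↔ x ∈ lst ∧ a < x := by
  have hpw : s.Pairwise (· < ·) := by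
    rw [hs]; exact PySem.List.sorted_ofList_pairwise_lt (xs := lst)
  have hmem : ∀ x : Int, x ∈ s ↔ x ∈ lst := by
    intro x
    rw [hs, PySem.List.mem_sorted, PySem.Set.mem_ofList]
  obtain ⟨hk, hsk, -⟩ := PySem.List.getElem_of_index?_eq_some hi
  have hpg := List.pairwise_iff_getElem.mp hpw
  intro x
  constructor
  · intro hx
    obtain ⟨j, hj, hxe⟩ := List.mem_iff_getElem.mp hx
    rw [List.getElem_drop] at hxe
    have hjlen : i + 1 + j < s.length := by
      have := List.length_drop (l := s) (i := i + 1); omega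
    have hlt : s[i] < s[i + 1 + j] := hpg i (i + 1 + j) hk hjlen (by omega)
    refine ⟨(hmem x).mp (List.mem_of_mem_drop hx), ?_⟩
    rw [← hsk, ← hxe]
    exact hlt
  · rintro ⟨hx1, hx2⟩
    obtain ⟨j, hj, hxe⟩ := List.mem_iff_getElem.mp ((hmem x).mpr hx1)
    have hij : i + 1 ≤ j := by
      rcases Nat.lt_or_ge j (i + 1) with hc | hc
      · exfalso
        rcases Nat.lt_or_ge j i with h | h
        · have hlt : s[j] < s[i] := hpg j i hj hk h
          rw [hxe, hsk] at hlt
          omega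
        · have : j = i := by omega
          subst this
          rw [hxe] at hsk
          omega
      · exact hc
    refine List.mem_iff_getElem.mpr ⟨j - (i + 1), ?_, ?_⟩
    · rw [List.length_drop]; omega
    · rw [List.getElem_drop, ← hxe]
      congr 1
      omega

-- ===== VERDICT (by name: the statement is the Claim_ definition above) =====
theorem FindLst_spec : Claim_equal_FindLst := by
  intro lst _ hpre
  unfold Spec_FindLst
  obtain ⟨a, t, rfl⟩ : ∃ a t, lst = a :: t := by
    cases lst with
    | nil => exact absurd rfl hpre
    | cons a t => exact ⟨a, t, rfl⟩
  set G : Int → Int := fun m => t.foldl gstep m with hG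
  have hinner : ∀ st : Int × Int,
      List.foldl (fun st j => stepA st (PySem.List.pyGetD (a :: t) j 0)) st
        (PySem.List.pyRange 1 ((a :: t).length : Int)) = List.foldl stepA st t := by
    intro st
    have h := PySem.List.foldl_pyRange_pyGetD' (a :: t) 0 stepA st (a := 1) (by norm_num)
    simpa using h
  have hfun : (fun (st : Int × Int) (_i : Int) =>
      List.foldl (fun st j => stepA st (PySem.List.pyGetD (a :: t) j 0)) st
        (PySem.List.pyRange 1 ((a :: t).length : Int))) =
      (fun st _i => List.foldl stepA st t) := by
    funext st _i
    exact hinner st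
  have hlen : ((PySem.List.pyRange 1 ((a :: t).length : Int)).length) = t.length := by
    rw [PySem.List.length_pyRange_one]
    simp
  have hA : FindLst (a :: t) =
      [((fun st => List.foldl stepA st t)^[t.length] (a, a)).1,
       ((fun st => List.foldl stepA st t)^[t.length] (a, a)).2] := by
    simp only [FindLst]
    rw [hfun, foldl_const_eq_iterate, hlen]
  have hA2 : FindLst (a :: t) = [t.foldl min a, G^[t.length] a] := by
    rw [hA]
    cases t with
    | nil => simp [hG]
    | cons b r =>
      have hl : (b :: r).length = r.length + 1 := rfl
      rw [hl, pass_iterate (b :: r) a r.length, hG]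
  set s := PySem.List.sorted (PySem.Set.ofList (a :: t)) (fun x => x) false with hs
  have has : a ∈ s := by
    rw [hs, PySem.List.mem_sorted, PySem.Set.mem_ofList]
    exact List.mem_cons_self ..
  obtain ⟨i, hi⟩ : ∃ i, PySem.List.index? s a = some i :=
    Option.isSome_iff_exists.mp ((PySem.List.index?_isSome_iff s a).mpr has)
  have hB : FindLst_alt (a :: t) = [t.foldl min a, walkB (s.drop (i + 1)) a] := by
    simp only [FindLst_alt]
    rw [PySem.List.min?_id_cons, ← hs, hi]
    simp
  have hmemr := mem_drop_sorted_iff (a :: t) a s hs i hi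
  have hpwr : (s.drop (i + 1)).Pairwise (· < ·) := by
    have hpw : s.Pairwise (· < ·) := by
      rw [hs]; exact PySem.List.sorted_ofList_pairwise_lt (a :: t)
    exact List.Pairwise.sublist (List.drop_sublist _ _) hpw
  obtain ⟨hw1, hw2, hw3⟩ := walk_spec (a :: t) (s.drop (i + 1)) a hpwr hmemr
  set W := walkB (s.drop (i + 1)) a with hW
  have hchain_t : ∀ k, a < k → k ≤ W → k ∈ t := by
    intro k h1 h2
    rcases List.mem_cons.mp (hw2 k h1 h2) with h | h
    · omega
    · exact h
  have hblock : ∀ x ∈ t, x ≠ W + 1 := by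
    intro x hx hc
    exact hw3 (hc ▸ List.mem_cons_of_mem a hx)
  have hle : G^[t.length] a ≤ W := by
    rw [hG]
    exact iterate_gstep_le t a W hw1 hblock t.length
  have hcard : W ≤ a + t.length := chain_le_card t a W hw1 hchain_t
  have hge : W ≤ G^[t.length] a := by
    rcases iterate_gstep_ge t a W hw1 hchain_t t.length with h | h
    · rw [← hG] at h
      exact h
    · rw [← hG] at h
      omega
  rw [hA2, hB, le_antisymm hle hge]
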